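-- pv_equiv track=rewrite | github.com/MrBrantCode/unitest_baseline | mut_generate/mist_train_taco/taco_3193/solution.py | count_valid_pairs
-- ===== SOURCE A (Python) =====
-- def count_valid_pairs(arr, n):
--     t = [arr[i] - i for i in range(n)]
--     dic = {}
--
--     for value in t:
--         if value not in dic:
--             dic[value] = 1
--         else:
--             dic[value] += 1
--
--     count = 0
--     for key in dic:
--         if dic[key] > 1:
--             count += dic[key] * (dic[key] - 1) // 2
--
--     return count
-- ===== SOURCE B (Python) =====
-- def count_valid_pairs(arr, n):
--     seen = {}
--     count = 0
--     for i in range(n):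
--         value = arr[i] - i
--         count += seen.get(value, 0)
--         seen[value] = seen.get(value, 0) + 1
--     return count
-- ===== Notes on version B (the rewrite author's own statement) =====
-- stated objective: alternative
-- what changed: Single fused pass that accumulates, for each element, how many earlier indices had the same arr[i]-i via a running dict, replacing A's materialised difference list, separate counting pass and closed-form C(c,2) summation over distinct keys.
import Mathlib
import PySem

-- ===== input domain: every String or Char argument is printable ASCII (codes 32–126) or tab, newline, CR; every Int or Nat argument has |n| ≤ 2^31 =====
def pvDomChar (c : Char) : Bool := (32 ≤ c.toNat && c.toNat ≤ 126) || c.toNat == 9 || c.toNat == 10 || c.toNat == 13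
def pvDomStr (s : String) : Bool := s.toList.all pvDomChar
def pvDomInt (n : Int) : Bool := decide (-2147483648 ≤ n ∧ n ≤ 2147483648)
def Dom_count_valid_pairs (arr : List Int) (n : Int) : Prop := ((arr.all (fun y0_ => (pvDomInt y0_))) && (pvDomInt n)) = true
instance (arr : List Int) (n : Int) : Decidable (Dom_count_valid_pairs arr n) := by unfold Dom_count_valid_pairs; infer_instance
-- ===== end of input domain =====

-- B fuses A's three phases (build difference list, count occurrences, sum C(c,2) over distinct keys)
-- into one pass that adds, per element, the number of earlier equal differences (objective: alternative).


-- ===== PORT A =====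
def count_valid_pairs (arr : List Int) (n : Int) : Int :=
  let t := (PySem.List.pyRange 0 n 1).map (fun i => PySem.List.pyGetD arr i 0 - i)
  let dic := t.foldl (fun d value =>
    if d.contains value = false then d.insert value 1 else d.modify value 0 (· + 1))
    (PySem.Dict.empty : PySem.Dict Int Int)
  dic.keys.foldl (fun count key =>
    if dic.getD key 0 > 1 then
      count + PySem.Int.floordiv (dic.getD key 0 * (dic.getD key 0 - 1)) 2
    else count) 0

-- ===== PORT B =====
def count_valid_pairs_alt (arr : List Int) (n : Int) : Int :=
  ((PySem.List.pyRange 0 n 1).foldl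
    (fun (p : PySem.Dict Int Int × Int) i =>
      let value := PySem.List.pyGetD arr i 0 - i
      (p.1.insert value (p.1.getD value 0 + 1), p.2 + p.1.getD value 0))
    ((PySem.Dict.empty : PySem.Dict Int Int), 0)).2

-- ===== PRECONDITION & SPEC =====
-- Pre_ excludes exactly the inputs where Python A raises IndexError: arr[i] with i in range(n) needs n ≤ len(arr).
def Pre_count_valid_pairs (arr : List Int) (n : Int) : Prop := n ≤ (arr.length : Int)
instance (arr : List Int) (n : Int) : Decidable (Pre_count_valid_pairs arr n) := by unfold Pre_count_valid_pairs; infer_instance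
def pvWitness_count_valid_pairs : List Int × Int := ([1, 2, 2], 3)
def Spec_count_valid_pairs (arr : List Int) (n : Int) (out : Int) : Prop := out = count_valid_pairs_alt arr n
instance (arr : List Int) (n : Int) (out : Int) : Decidable (Spec_count_valid_pairs arr n out) := by unfold Spec_count_valid_pairs; infer_instance

-- ===== CLAIM (what is proved, stated in full; the proofs are below) =====
def Claim_equal_count_valid_pairs : Prop := ∀ (arr : List Int) (n : Int), Dom_count_valid_pairs arr n → Pre_count_valid_pairs arr n → Spec_count_valid_pairs arr n (count_valid_pairs arr n)

-- ===== LEMMAS AND PROOFS =====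

-- A's per-key contribution: C(c,2) with A's guard.
def pvG (c : Int) : Int := if 1 < c then PySem.Int.floordiv (c * (c - 1)) 2 else 0

-- A's result as a sum over the distinct values of t.
def pvAsum (t : List Int) : Int := ((PySem.Set.ofList t).map (fun k => pvG ((t.count k : Int)))).sum

-- B's running-pair loop over a ready-made list t.
def pvStepB (p : PySem.Dict Int Int × Int) (v : Int) : PySem.Dict Int Int × Int :=
  (p.1.insert v (p.1.getD v 0 + 1), p.2 + p.1.getD v 0)

def pvBsum (t : List Int) : Int := (t.foldl pvStepB ((PySem.Dict.empty : PySem.Dict Int Int), 0)).2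

lemma pvG_eq (c : Int) (hc : 0 ≤ c) : pvG c = PySem.Int.floordiv (c * (c - 1)) 2 := by
  unfold pvG
  split_ifs with h
  · rfl
  · interval_cases c <;> decide

lemma pvG_succ (c : Nat) : pvG ((c : Int) + 1) = pvG (c : Int) + (c : Int) := by
  rw [pvG_eq _ (by positivity), pvG_eq _ (by positivity)]
  rw [PySem.Int.floordiv_eq_ediv_of_pos (by norm_num),
      PySem.Int.floordiv_eq_ediv_of_pos (by norm_num)]
  have h : ((c : Int) + 1) * ((c : Int) + 1 - 1) = (c : Int) * ((c : Int) - 1) + (c : Int) * 2 := by ring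
  rw [h, Int.add_mul_ediv_right _ _ (by norm_num : (2 : Int) ≠ 0)]

lemma pvStepB_fst (t : List Int) (d : PySem.Dict Int Int) (c : Int) :
    (t.foldl pvStepB (d, c)).1 = t.foldl (fun d v => d.insert v (d.getD v 0 + 1)) d := by
  induction t generalizing d c with
  | nil => rfl
  | cons x xs ih => simp [pvStepB, ih]

lemma pvBsum_append (t : List Int) (x : Int) :
    pvBsum (t ++ [x]) = pvBsum t + (t.count x : Int) := by
  unfold pvBsum
  rw [List.foldl_append]
  show (t.foldl pvStepB _).2 + (t.foldl pvStepB _).1.getD x 0 = _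
  rw [pvStepB_fst, PySem.Dict.foldl_insert_getD_add_one_eq_counter, PySem.Dict.getD_counter]

-- sum over a nodup list after changing the function at exactly one member
lemma pv_sum_map_update (l : List Int) (x : Int) (f f' : Int → Int)
    (hl : l.Nodup) (hx : x ∈ l) (h : ∀ k ∈ l, k ≠ x → f' k = f k) :
    (l.map f').sum = (l.map f).sum + (f' x - f x) := by
  induction l with
  | nil => cases hx
  | cons a as ih =>
    rcases List.mem_cons.mp hx with rfl | hxs
    · have : ∀ k ∈ as, f' k = f k := by
        intro k hk
        exact h k (List.mem_cons_of_mem _ hk) (fun hkx => (List.nodup_cons.mp hl).1 (hkx ▸ hk))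
      simp [List.map_congr_left this]; ring
    · have hax : a ≠ x := fun hax => (List.nodup_cons.mp hl).1 (hax ▸ hxs)
      rw [List.map_cons, List.map_cons, List.sum_cons, List.sum_cons,
          h a (List.mem_cons_self) hax,
          ih (List.nodup_cons.mp hl).2 hxs (fun k hk => h k (List.mem_cons_of_mem _ hk))]
      ring

lemma pvAsum_append (t : List Int) (x : Int) :
    pvAsum (t ++ [x]) = pvAsum t + (t.count x : Int) := by
  unfold pvAsum
  rw [PySem.Set.ofList_append_singleton]
  by_cases hx : x ∈ t
  · have hmem : x ∈ PySem.Set.ofList t := (PySem.Set.mem_ofList t x).mpr hx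
    rw [PySem.Set.add_of_mem hmem]
    have := pv_sum_map_update (PySem.Set.ofList t) x
      (fun k => pvG ((t.count k : Int))) (fun k => pvG (((t ++ [x]).count k : Int)))
      (PySem.Set.nodup_ofList t) hmem
      (by
        intro k _ hkx
        simp [List.count_append, List.count_singleton', if_neg (Ne.symm hkx)])
    rw [this]
    show _ + (pvG (((t ++ [x]).count x : Int)) - pvG ((t.count x : Int))) = _
    have hcx : (t ++ [x]).count x = t.count x + 1 := by
      simp [List.count_append]
    rw [hcx]
    push_cast
    rw [pvG_succ]
    ring
  · have hmem : x ∉ PySem.Set.ofList t := fun h => hx ((PySem.Set.mem_ofList t x).mp h)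
    rw [PySem.Set.add_of_not_mem hmem]
    have hcnt : ∀ k ∈ PySem.Set.ofList t, (t ++ [x]).count k = t.count k := by
      intro k hk
      have hkx : k ≠ x := fun hkx => hx (hkx ▸ (PySem.Set.mem_ofList t k).mp hk)
      simp [List.count_append, List.count_singleton', if_neg (Ne.symm hkx)]
    have hc0 : t.count x = 0 := List.count_eq_zero.mpr hx
    have hcx : (t ++ [x]).count x = 1 := by simp [List.count_append, hc0]
    rw [List.map_append, List.sum_append,
        List.map_congr_left (fun k hk => by rw [hcnt k hk])]
    simp [hc0, pvG]

lemma pv_main (t : List Int) : pvAsum t = pvBsum t := by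
  induction t using List.reverseRecOn with
  | nil => rfl
  | append_singleton xs x ih => rw [pvAsum_append, pvBsum_append, ih]

lemma pvA_eq (t : List Int) :
    (t.foldl (fun d value =>
        if d.contains value = false then d.insert value 1 else d.modify value 0 (· + 1))
      (PySem.Dict.empty : PySem.Dict Int Int)) = PySem.Dict.counter t := by
  rw [PySem.Dict.counter_eq_foldl]
  apply PySem.List.foldl_congr_mem
  intro d v _
  by_cases h : d.contains v = false
  · rw [if_pos h]
    have h0 : d.getD v 0 = 0 := PySem.Dict.getD_of_not_contains d 0 h
    simp [PySem.Dict.modify, h0]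
  · rw [if_neg h]

lemma pvA_sum (t : List Int) :
    ((PySem.Dict.counter t : PySem.Dict Int Int)).keys.foldl (fun count key =>
      if (PySem.Dict.counter t).getD key 0 > 1 then
        count + PySem.Int.floordiv ((PySem.Dict.counter t).getD key 0 * ((PySem.Dict.counter t).getD key 0 - 1)) 2
      else count) 0 = pvAsum t := by
  rw [PySem.Dict.keys_counter]
  have hb : ∀ (c : Int) (k : Int), (if (PySem.Dict.counter t).getD k 0 > 1 then
      c + PySem.Int.floordiv ((PySem.Dict.counter t).getD k 0 * ((PySem.Dict.counter t).getD k 0 - 1)) 2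
      else c) = c + pvG ((t.count k : Int)) := by
    intro c k
    rw [PySem.Dict.getD_counter]
    unfold pvG
    split_ifs <;> simp
  calc (PySem.Set.ofList t).foldl _ 0
      = (PySem.Set.ofList t).foldl (fun c k => c + pvG ((t.count k : Int))) 0 := by
        apply PySem.List.foldl_congr_mem; intro c k _; exact hb c k
    _ = pvAsum t := by rw [PySem.List.foldl_add]; unfold pvAsum; simp

-- ===== VERDICT (by name: the statement is the Claim_ definition above) =====
theorem count_valid_pairs_spec : Claim_equal_count_valid_pairs := by
  intro arr n _ _
  show count_valid_pairs arr n = count_valid_pairs_alt arr n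
  simp only [count_valid_pairs, count_valid_pairs_alt]
  rw [show (fun (p : PySem.Dict Int Int × Int) (i : Int) =>
        let value := PySem.List.pyGetD arr i 0 - i
        (p.1.insert value (p.1.getD value 0 + 1), p.2 + p.1.getD value 0)) =
      (fun p i => pvStepB p (PySem.List.pyGetD arr i 0 - i)) from rfl,
      ← List.foldl_map (f := fun i => PySem.List.pyGetD arr i 0 - i) (g := pvStepB)]
  rw [pvA_eq, pvA_sum, ← pvBsum, pv_main]
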